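-- pv_equiv track=rewrite | github.com/MounikaMullukuntla/chat | ingestion/vector_db_sync.py | take_embedding_batch
-- ===== SOURCE A (Python) =====
-- from typing import List, Tuple, Optional
--
-- EMBEDDING_MAX_TEXTS_PER_BATCH = 1000
--
-- EMBEDDING_MAX_TOKENS_PER_BATCH = 100_000
--
-- def take_embedding_batch(queue: List[dict]) -> Tuple[List[dict], int]:
--     if not queue:
--         return [], 0
--
--     batch: List[dict] = []
--     total_tokens = 0
--     for item in queue:
--         token_count = max(int(item["entry"].get("metadata", {}).get("token_count", 0)), 1)
--         if batch and (
--             len(batch) >= EMBEDDING_MAX_TEXTS_PER_BATCH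
--             or total_tokens + token_count > EMBEDDING_MAX_TOKENS_PER_BATCH
--         ):
--             break
--         batch.append(item)
--         total_tokens += token_count
--         if (
--             len(batch) >= EMBEDDING_MAX_TEXTS_PER_BATCH
--             or total_tokens >= EMBEDDING_MAX_TOKENS_PER_BATCH
--         ):
--             break
--
--     del queue[:len(batch)]
--     return batch, total_tokens
-- ===== SOURCE B (Python) =====
-- from itertools import accumulate
-- from bisect import bisect_right
-- from typing import List, Tuple
--
-- EMBEDDING_MAX_TEXTS_PER_BATCH = 1000
--
-- EMBEDDING_MAX_TOKENS_PER_BATCH = 100_000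
--
-- def take_embedding_batch(queue: List[dict]) -> Tuple[List[dict], int]:
--     if not queue:
--         return [], 0
--     weights = [
--         max(int(item["entry"].get("metadata", {}).get("token_count", 0)), 1)
--         for item in queue
--     ]
--     prefix = list(accumulate(weights))
--     # prefix is strictly increasing (weights >= 1), so bisect_right counts
--     # the leading items whose inclusive token total stays within the budget.
--     cutoff = bisect_right(prefix, EMBEDDING_MAX_TOKENS_PER_BATCH)
--     n = min(EMBEDDING_MAX_TEXTS_PER_BATCH, max(1, cutoff))
--     batch = queue[:n]
--     total_tokens = prefix[n - 1]
--     del queue[:n]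
--     return batch, total_tokens
-- ===== Notes on version B (the rewrite author's own statement) =====
-- stated objective: alternative
-- what changed: Replaces A's stateful loop with two break conditions by a prefix-sum table (itertools.accumulate) plus a bisect_right cutoff, computing the batch size n = min(1000, max(1, cutoff)) in closed form and slicing.
import Mathlib
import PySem

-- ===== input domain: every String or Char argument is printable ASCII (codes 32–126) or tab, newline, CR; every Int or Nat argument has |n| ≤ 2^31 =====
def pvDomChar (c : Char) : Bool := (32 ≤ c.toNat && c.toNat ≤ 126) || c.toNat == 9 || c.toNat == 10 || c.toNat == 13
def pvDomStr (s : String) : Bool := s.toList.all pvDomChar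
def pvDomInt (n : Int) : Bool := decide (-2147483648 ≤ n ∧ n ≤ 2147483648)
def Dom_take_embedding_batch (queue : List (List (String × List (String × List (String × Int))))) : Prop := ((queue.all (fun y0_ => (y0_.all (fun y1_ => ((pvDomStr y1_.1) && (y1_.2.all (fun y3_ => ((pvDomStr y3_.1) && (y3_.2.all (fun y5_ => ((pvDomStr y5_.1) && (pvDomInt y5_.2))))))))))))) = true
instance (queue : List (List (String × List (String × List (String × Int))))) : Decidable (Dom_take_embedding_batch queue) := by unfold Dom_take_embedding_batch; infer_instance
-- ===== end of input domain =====

-- B replaces A's stateful break-on-limits loop by a prefix-sum table and a single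
-- closed-form cutoff (alternative decomposition, same O(n) cost).  Both Pythons
-- truncate the argument list in place by the same amount; the equivalence proved
-- here is about the RETURN value (B performs the same mutation).

-- first-match association-list lookup with default = dict.get(k, dflt)
def pvGetA {α : Type} (d : List (String × α)) (k : String) (dflt : α) : α :=
  match d.find? (fun kv => kv.1 == k) with
  | some kv => kv.2
  | none => dflt

-- ===== PORT A =====
-- token_count = max(int(item["entry"].get("metadata", {}).get("token_count", 0)), 1)
-- (Pre_ guarantees the "entry" key is present, so the [] default is never used)
def pvTokA (item : List (String × List (String × List (String × Int)))) : Int :=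
  max (pvGetA (pvGetA (pvGetA item "entry" []) "metadata" []) "token_count" 0) 1

-- A's for-loop over the remaining items, carrying (batch, total_tokens)
def pvLoopA (items : List (List (String × List (String × List (String × Int)))))
    (batch : List (List (String × List (String × List (String × Int))))) (total : Int) :
    (List (List (String × List (String × List (String × Int))))) × Int :=
  match items with
  | [] => (batch, total)
  | item :: rest =>
    let tc := pvTokA item
    if batch ≠ [] ∧ (1000 ≤ batch.length ∨ 100000 < total + tc) then (batch, total)
    else
      let batch' := batch ++ [item]
      let total' := total + tc
      if 1000 ≤ batch'.length ∨ 100000 ≤ total' then (batch', total')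
      else pvLoopA rest batch' total'

def take_embedding_batch (queue : List (List (String × List (String × List (String × Int))))) : (List (List (String × List (String × List (String × Int))))) × Int :=
  if queue = [] then ([], 0) else pvLoopA queue [] 0

-- ===== PORT B =====
def pvTokB (item : List (String × List (String × List (String × Int)))) : Int :=
  max (pvGetA (pvGetA (pvGetA item "entry" []) "metadata" []) "token_count" 0) 1

-- itertools.accumulate
def pvAccumB (xs : List Int) (acc : Int) : List Int :=
  match xs with
  | [] => []
  | x :: rest => (acc + x) :: pvAccumB rest (acc + x)

def take_embedding_batch_alt (queue : List (List (String × List (String × List (String × Int))))) : (List (List (String × List (String × List (String × Int))))) × Int :=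
  if queue = [] then ([], 0)
  else
    let weights := queue.map pvTokB
    let prefs := pvAccumB weights 0
    -- prefix is strictly increasing (weights ≥ 1), so bisect_right(prefix, 100000)
    -- is the number of elements ≤ 100000
    let cutoff := prefs.countP (fun p => decide (p ≤ 100000))
    let n := min 1000 (max 1 cutoff)
    (queue.take n, prefs.getD (n - 1) 0)

-- ===== PRECONDITION & SPEC =====
-- Pre_ requires every queued item to carry the "entry" key (A raises KeyError when its
-- loop inspects an item without it).  This excludes a few inputs on which A still
-- returns — items past the break point are never inspected by A's lazy loop — but
-- B's upfront weight pass itself raises KeyError there, so they stay outside Pre_.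
def Pre_take_embedding_batch (queue : List (List (String × List (String × List (String × Int))))) : Prop :=
  ∀ item ∈ queue, (item.find? (fun kv => kv.1 == "entry")).isSome
instance (queue : List (List (String × List (String × List (String × Int))))) : Decidable (Pre_take_embedding_batch queue) := by unfold Pre_take_embedding_batch; infer_instance

def pvWitness_take_embedding_batch : (List (List (String × List (String × List (String × Int))))) :=
  [[("entry", [("metadata", [("token_count", 7)])])], [("entry", [])]]

def Spec_take_embedding_batch (queue : List (List (String × List (String × List (String × Int))))) (out : (List (List (String × List (String × List (String × Int))))) × Int) : Prop := out = take_embedding_batch_alt queue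
-- deep nesting defeats one-shot instance search, so stage the DecidableEq chain with letI
def pvDecEqOut : DecidableEq ((List (List (String × List (String × List (String × Int))))) × Int) :=
  letI d0 : DecidableEq (List (String × Int)) := inferInstance
  letI d1 : DecidableEq (List (String × List (String × Int))) := inferInstance
  letI d2 : DecidableEq (List (String × List (String × List (String × Int)))) := inferInstance
  inferInstance
instance (queue : List (List (String × List (String × List (String × Int))))) (out : (List (List (String × List (String × List (String × Int))))) × Int) : Decidable (Spec_take_embedding_batch queue out) := by unfold Spec_take_embedding_batch; exact pvDecEqOut out (take_embedding_batch_alt queue)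

-- ===== CLAIM (what is proved, stated in full; the proofs are below) =====
def Claim_equal_take_embedding_batch : Prop := ∀ (queue : List (List (String × List (String × List (String × Int))))), Dom_take_embedding_batch queue → Pre_take_embedding_batch queue → Spec_take_embedding_batch queue (take_embedding_batch queue)

-- ===== LEMMAS AND PROOFS =====

theorem pvTok_eq (item : List (String × List (String × List (String × Int)))) : pvTokA item = pvTokB item := rfl

theorem pvTok_ge_one (item : List (String × List (String × List (String × Int)))) : 1 ≤ pvTokA item :=
  le_max_right _ _

-- every accumulated prefix over weights ≥ 1 exceeds the start value
theorem pvAccum_lb (xs : List Int) (a : Int) (h : ∀ x ∈ xs, 1 ≤ x) :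
    ∀ p ∈ pvAccumB xs a, a + 1 ≤ p := by
  induction xs generalizing a with
  | nil => intro p hp; simp [pvAccumB] at hp
  | cons x rest ih =>
    intro p hp
    simp only [pvAccumB, List.mem_cons] at hp
    rcases hp with rfl | hp
    · have := h x (by simp); omega
    · have h1 := h x (by simp)
      have := ih (a + x) (fun y hy => h y (by simp [hy])) p hp
      omega

theorem pvAccum_countP_zero (xs : List Int) (a : Int) (h : ∀ x ∈ xs, 1 ≤ x)
    (ha : 100000 ≤ a) :
    (pvAccumB xs a).countP (fun p => decide (p ≤ 100000)) = 0 := by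
  rw [List.countP_eq_zero]
  intro p hp
  have := pvAccum_lb xs a h p hp
  simp; omega

-- main loop invariant: with 1 ≤ |batch| < 1000 and total < 100000, A's loop
-- returns exactly B's closed form shifted by the state already consumed
theorem pvLoop_closed (items : List (List (String × List (String × List (String × Int)))))
    (batch : List (List (String × List (String × List (String × Int))))) (total : Int)
    (hb1 : 1 ≤ batch.length) (hb2 : batch.length < 1000) (ht : total < 100000) :
    pvLoopA items batch total =
      (batch ++ items.take (min (1000 - batch.length)
          ((pvAccumB (items.map pvTokA) total).countP (fun p => decide (p ≤ 100000)))),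
       (total :: pvAccumB (items.map pvTokA) total).getD
          (min (1000 - batch.length)
            ((pvAccumB (items.map pvTokA) total).countP (fun p => decide (p ≤ 100000)))) 0) := by
  induction items generalizing batch total with
  | nil => simp [pvLoopA, pvAccumB]
  | cons item rest ih =>
    have hbne : batch ≠ [] := by
      intro h; rw [h] at hb1; simp at hb1
    have htok := pvTok_ge_one item
    have hwts : ∀ x ∈ rest.map pvTokA, 1 ≤ x := by
      intro x hx
      rcases List.mem_map.mp hx with ⟨i, _, rfl⟩
      exact pvTok_ge_one i
    by_cases hbrk : 100000 < total + pvTokA item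
    · -- break before appending: cutoff is 0
      have hc : ((total + pvTokA item) :: pvAccumB (rest.map pvTokA) (total + pvTokA item)).countP
          (fun p => decide (p ≤ 100000)) = 0 := by
        rw [List.countP_cons, pvAccum_countP_zero _ _ hwts (by omega)]
        simp [show ¬ (total + pvTokA item ≤ 100000) from by omega]
      simp only [pvLoopA, List.map_cons, pvAccumB, hc]
      rw [if_pos ⟨hbne, Or.inr hbrk⟩]
      simp
    · push_neg at hbrk
      by_cases hfull : (100000 : Int) ≤ total + pvTokA item
      · -- total' = 100000 exactly: second break fires, cutoff = 1
        have heq : total + pvTokA item = 100000 := le_antisymm hbrk hfull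
        have hc : ((total + pvTokA item) :: pvAccumB (rest.map pvTokA) (total + pvTokA item)).countP
            (fun p => decide (p ≤ 100000)) = 1 := by
          rw [List.countP_cons, pvAccum_countP_zero _ _ hwts (by omega)]
          simp [show total + pvTokA item ≤ 100000 from hbrk]
        simp only [pvLoopA, List.map_cons, pvAccumB, hc]
        rw [if_neg (by rintro ⟨-, h | h⟩ <;> omega)]
        rw [if_pos (Or.inr (by simpa [heq] using le_refl (100000 : Int)))]
        have hmin : min (1000 - batch.length) 1 = 1 := by omega
        simp [hmin]
      · push_neg at hfull
        by_cases hcount : 1000 ≤ batch.length + 1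
        · -- count cap reached on this append
          have hb : batch.length = 999 := by omega
          have hc1 : 1 ≤ ((total + pvTokA item) :: pvAccumB (rest.map pvTokA) (total + pvTokA item)).countP
              (fun p => decide (p ≤ 100000)) := by
            rw [List.countP_cons]
            simp [show total + pvTokA item ≤ 100000 from hbrk]
          simp only [pvLoopA, List.map_cons, pvAccumB]
          rw [if_neg (by rintro ⟨-, h | h⟩ <;> omega)]
          rw [if_pos (Or.inl (by simp [hb]))]
          have hmin : min (1000 - batch.length)
              (((total + pvTokA item) :: pvAccumB (rest.map pvTokA) (total + pvTokA item)).countP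
                (fun p => decide (p ≤ 100000))) = 1 := by omega
          rw [hmin]
          simp
        · -- continue: peel one item, shift the state, apply the IH
          have hrec := ih (batch ++ [item]) (total + pvTokA item)
            (by simp) (by simp; omega) hfull
          have hc : ((total + pvTokA item) :: pvAccumB (rest.map pvTokA) (total + pvTokA item)).countP
              (fun p => decide (p ≤ 100000)) =
              (pvAccumB (rest.map pvTokA) (total + pvTokA item)).countP (fun p => decide (p ≤ 100000)) + 1 := by
            rw [List.countP_cons]
            simp [show total + pvTokA item ≤ 100000 from hbrk]
          simp only [pvLoopA, List.map_cons, pvAccumB, hc]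
          rw [if_neg (by rintro ⟨-, h | h⟩ <;> omega)]
          have hn1 : ¬ (1000 ≤ (batch ++ [item]).length) := by simp; omega
          have hn2 : ¬ ((100000 : Int) ≤ total + pvTokA item) := by omega
          rw [if_neg (by rintro (h | h); exacts [hn1 h, hn2 h])]
          rw [hrec]
          have hmin : min (1000 - batch.length)
              ((pvAccumB (rest.map pvTokA) (total + pvTokA item)).countP (fun p => decide (p ≤ 100000)) + 1) =
              min (1000 - (batch ++ [item]).length)
                ((pvAccumB (rest.map pvTokA) (total + pvTokA item)).countP (fun p => decide (p ≤ 100000))) + 1 := by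
            simp; omega
          rw [hmin]
          simp [List.take_succ_cons]

-- ===== VERDICT (by name: the statement is the Claim_ definition above) =====
theorem take_embedding_batch_spec : Claim_equal_take_embedding_batch := by
  intro queue _ _
  unfold Spec_take_embedding_batch take_embedding_batch take_embedding_batch_alt
  cases queue with
  | nil => simp
  | cons q0 rest =>
    simp only [if_neg (List.cons_ne_nil q0 rest)]
    have htok := pvTok_ge_one q0
    have hwts : ∀ x ∈ rest.map pvTokA, 1 ≤ x := by
      intro x hx
      rcases List.mem_map.mp hx with ⟨i, _, rfl⟩
      exact pvTok_ge_one i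
    have hmap : (q0 :: rest).map pvTokB = pvTokA q0 :: rest.map pvTokA := by
      simp [List.map_cons, ← pvTok_eq]
    simp only [pvLoopA, hmap, pvAccumB, Int.zero_add]
    rw [if_neg (by rintro ⟨h, -⟩; exact h rfl)]
    by_cases hfull : (100000 : Int) ≤ pvTokA q0
    · -- the first item alone reaches the budget: both take exactly one item
      rw [if_pos (Or.inr (by simpa using hfull))]
      have hz := pvAccum_countP_zero (rest.map pvTokA) (pvTokA q0) hwts hfull
      rw [List.countP_cons, hz]
      by_cases hle : pvTokA q0 ≤ 100000
      · simp [hle]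
      · simp [hle]
    · push_neg at hfull
      have hn1 : ¬ (1000 ≤ (([] : List (List (String × List (String × List (String × Int))))) ++ [q0]).length) := by simp
      have hn2 : ¬ ((100000 : Int) ≤ pvTokA q0) := by omega
      rw [if_neg (by rintro (h | h); exacts [hn1 h, hn2 h])]
      simp only [List.nil_append]
      rw [pvLoop_closed rest [q0] (pvTokA q0) (by simp) (by simp) hfull]
      rw [List.countP_cons]
      simp only [show decide (pvTokA q0 ≤ 100000) = true from by simp; omega, if_true]
      set c := (pvAccumB (rest.map pvTokA) (pvTokA q0)).countP (fun p => decide (p ≤ 100000)) with hc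
      have hmin : min 1000 (max 1 (c + 1)) = min (1000 - ([q0] : List (List (String × List (String × List (String × Int))))).length) c + 1 := by
        simp; omega
      rw [hmin]
      simp [List.take_succ_cons]
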